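-- pv_equiv track=rewrite | github.com/weiyangzen/awesome_algorithms | Algorithms/数学-字符串算法-0528-回文树/demo.py | brute_force_occurrences
-- ===== SOURCE A (Python) =====
-- def brute_force_occurrences(text: str) -> dict[str, int]:
--     """仅用于小样本验证正确性的暴力计数。"""
--     result: dict[str, int] = {}
--     n = len(text)
--     for i in range(n):
--         for j in range(i, n):
--             s = text[i : j + 1]
--             if s == s[::-1]:
--                 result[s] = result.get(s, 0) + 1
--     return result
-- ===== SOURCE B (Python) =====
-- def _pal_table(text: str) -> dict[tuple[int, int], bool]:
--     """pal[(i, j)] == True iff text[i:j+1] is a palindrome; filled by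
--     increasing substring length so each test is O(1)."""
--     n = len(text)
--     pal: dict[tuple[int, int], bool] = {}
--     for L in range(1, n + 1):
--         for i in range(0, n - L + 1):
--             j = i + L - 1
--             if text[i] == text[j] and (L < 3 or pal.get((i + 1, j - 1), False)):
--                 pal[(i, j)] = True
--     return pal
--
--
-- def brute_force_occurrences(text: str) -> dict[str, int]:
--     """Dynamic programming: a palindromicity table is filled by increasing
--     length (O(1) test per pair) instead of an O(n) slice-and-reverse
--     comparison per substring; the counting pass then only materialises the
--     substrings the table marks as palindromic."""
--     pal = _pal_table(text)
--     n = len(text)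
--     result: dict[str, int] = {}
--     for i in range(n):
--         for j in range(i, n):
--             if pal.get((i, j), False):
--                 s = text[i : j + 1]
--                 result[s] = result.get(s, 0) + 1
--     return result
-- ===== Notes on version B (the rewrite author's own statement) =====
-- stated objective: alternative
-- what changed: Replaces the per-substring O(n) slice-and-reverse palindrome test by a dynamic-programming table pal[(i,j)] filled by increasing length (O(1) test per pair), with a second pass that materialises only the palindromic substrings; on duplicate-heavy worst-case inputs both are dominated by building the palindromic slices, so no overall speed is claimed.
import Mathlib
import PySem

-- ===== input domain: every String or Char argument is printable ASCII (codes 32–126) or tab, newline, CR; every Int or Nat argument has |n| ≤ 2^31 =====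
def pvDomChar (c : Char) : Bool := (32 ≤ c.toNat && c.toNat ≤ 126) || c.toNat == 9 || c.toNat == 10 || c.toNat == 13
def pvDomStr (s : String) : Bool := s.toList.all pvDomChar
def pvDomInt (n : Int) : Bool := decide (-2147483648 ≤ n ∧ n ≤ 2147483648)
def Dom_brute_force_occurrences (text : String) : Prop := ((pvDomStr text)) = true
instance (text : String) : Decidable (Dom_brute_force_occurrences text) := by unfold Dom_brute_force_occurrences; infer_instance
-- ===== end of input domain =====

-- B replaces A's per-substring slice-and-reverse palindrome test by a DP table filled by
-- increasing length, so each palindromicity test is a table lookup (no speed claimed overall).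

-- ===== PORT A =====
def brute_force_occurrences (text : String) : List (String × Int) :=
  let n : Int := PySem.Str.len text
  ((PySem.List.pyRange 0 n 1).foldl (fun result i =>
      (PySem.List.pyRange i n 1).foldl (fun result j =>
        let s := PySem.Str.slice text (some i) (some (j + 1))
        if some s == PySem.Str.slice? s none none (-1) then
          result.insert s (result.getD s 0 + 1)
        else result) result)
    (PySem.Dict.empty : PySem.Dict String Int)).items

-- ===== PORT B =====
-- helper (Source B's _pal_table): pal[(i,j)] filled by increasing substring length
def pal_table (text : String) : PySem.Dict (Int × Int) Bool :=
  let n : Int := PySem.Str.len text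
  (PySem.List.pyRange 1 (n + 1) 1).foldl (fun pal L =>
    (PySem.List.pyRange 0 (n - L + 1) 1).foldl (fun pal i =>
      let j := i + L - 1
      if (PySem.Str.pyGet? text i == PySem.Str.pyGet? text j)
          && (decide (L < 3) || pal.getD (i + 1, j - 1) false)
      then pal.insert (i, j) true else pal) pal) PySem.Dict.empty

def brute_force_occurrences_alt (text : String) : List (String × Int) :=
  let pal := pal_table text
  let n : Int := PySem.Str.len text
  ((PySem.List.pyRange 0 n 1).foldl (fun result i =>
      (PySem.List.pyRange i n 1).foldl (fun result j =>
        if pal.getD (i, j) false then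
          let s := PySem.Str.slice text (some i) (some (j + 1))
          result.insert s (result.getD s 0 + 1)
        else result) result)
    (PySem.Dict.empty : PySem.Dict String Int)).items

-- ===== PRECONDITION & SPEC =====
def Spec_brute_force_occurrences (text : String) (out : List (String × Int)) : Prop := out = brute_force_occurrences_alt text
instance (text : String) (out : List (String × Int)) : Decidable (Spec_brute_force_occurrences text out) := by unfold Spec_brute_force_occurrences; infer_instance

-- ===== CLAIM (what is proved, stated in full; the proofs are below) =====
def Claim_equal_brute_force_occurrences : Prop := ∀ (text : String), Dom_brute_force_occurrences text → Spec_brute_force_occurrences text (brute_force_occurrences text)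

-- ===== LEMMAS AND PROOFS =====

-- the substring text[i:j+1] as a list of chars, and its palindromicity
def subIJ (cs : List Char) (i j : Int) : List Char := (cs.drop i.toNat).take (j - i + 1).toNat
def IsPalIJ (cs : List Char) (i j : Int) : Prop := (subIJ cs i j).reverse = subIJ cs i j

-- full table spec: the entries are exactly the palindromic (i,j) of length ≤ L
def TabSpec (cs : List Char) (d : PySem.Dict (Int × Int) Bool) (L : Int) : Prop :=
  ∀ i j : Int, d.getD (i, j) false = true ↔
    0 ≤ i ∧ i ≤ j ∧ j < (cs.length : Int) ∧ IsPalIJ cs i j ∧ j - i + 1 ≤ L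
-- partial spec during the inner loop at length L: starts < k already processed
def TabSpecP (cs : List Char) (d : PySem.Dict (Int × Int) Bool) (L k : Int) : Prop :=
  ∀ i j : Int, d.getD (i, j) false = true ↔
    0 ≤ i ∧ i ≤ j ∧ j < (cs.length : Int) ∧ IsPalIJ cs i j ∧
      (j - i + 1 ≤ L - 1 ∨ (j - i + 1 = L ∧ i < k))

-- the two loop bodies of pal_table, named for the inductions
def stepI (text : String) (L : Int) (pal : PySem.Dict (Int × Int) Bool) (i : Int) :
    PySem.Dict (Int × Int) Bool :=
  let j := i + L - 1
  if (PySem.Str.pyGet? text i == PySem.Str.pyGet? text j)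
      && (decide (L < 3) || pal.getD (i + 1, j - 1) false)
  then pal.insert (i, j) true else pal
def stepL (text : String) (pal : PySem.Dict (Int × Int) Bool) (L : Int) :
    PySem.Dict (Int × Int) Bool :=
  (PySem.List.pyRange 0 ((PySem.Str.len text) - L + 1) 1).foldl (stepI text L) pal

lemma pal_table_eq (text : String) :
    pal_table text = (PySem.List.pyRange 1 ((PySem.Str.len text) + 1) 1).foldl (stepL text)
      PySem.Dict.empty := rfl

lemma getD_empty_pair (key : Int × Int) :
    (PySem.Dict.empty : PySem.Dict (Int × Int) Bool).getD key false = false := rfl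

lemma subIJ_single (cs : List Char) (a : Nat) (ha : a < cs.length) :
    subIJ cs (a : Int) (a : Int) = [cs[a]] := by
  unfold subIJ
  have h1 : ((a:Int) - (a:Int) + 1).toNat = 1 := by omega
  have h2 : ((a:Int)).toNat = a := by omega
  have h3 : cs.drop a = cs[a] :: cs.drop (a+1) := List.drop_eq_getElem_cons ha
  rw [h1, h2, h3]
  rfl

lemma subIJ_decomp (cs : List Char) (a b : Nat) (hab : a < b) (hb : b < cs.length) :
    subIJ cs (a : Int) (b : Int) =
      cs[a]'(by omega) :: subIJ cs ((a : Int) + 1) ((b : Int) - 1) ++ [cs[b]'hb] := by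
  unfold subIJ
  have h1 : ((b:Int) - (a:Int) + 1).toNat = (b - a - 1) + 1 + 1 := by omega
  have h2 : (((b:Int) - 1) - ((a:Int) + 1) + 1).toNat = b - a - 1 := by omega
  have h3 : ((a:Int)).toNat = a := by omega
  have h4 : ((a:Int) + 1).toNat = a + 1 := by omega
  have h5 : cs.drop a = cs[a]'(by omega) :: cs.drop (a+1) := List.drop_eq_getElem_cons (by omega)
  rw [h1, h2, h3, h4, h5, List.take_succ_cons, List.take_add_one]
  have h6 : (cs.drop (a+1))[b-a-1]? = some (cs[b]'hb) := by
    rw [List.getElem?_drop, show a + 1 + (b - a - 1) = b by omega, List.getElem?_eq_getElem hb]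
  rw [h6]
  rfl

lemma pal_single (cs : List Char) (a : Nat) (ha : a < cs.length) :
    IsPalIJ cs (a : Int) (a : Int) := by
  unfold IsPalIJ
  rw [subIJ_single cs a ha]
  rfl

lemma pal_decomp (cs : List Char) (a b : Nat) (hab : a < b) (hb : b < cs.length) :
    IsPalIJ cs (a : Int) (b : Int) ↔
      cs[a]'(by omega) = cs[b]'hb ∧ IsPalIJ cs ((a : Int) + 1) ((b : Int) - 1) := by
  unfold IsPalIJ
  rw [subIJ_decomp cs a b hab hb]
  constructor
  · intro h
    simp only [List.reverse_cons, List.reverse_append, List.reverse_nil, List.nil_append,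
      List.cons_append, List.cons.injEq] at h
    obtain ⟨h1, h2⟩ := h
    rw [← h1] at h2
    rw [List.append_left_inj] at h2
    exact ⟨h1.symm, h2⟩
  · rintro ⟨h1, h2⟩
    simp [List.reverse_cons, List.reverse_append, h1, h2]

lemma pal_pair (cs : List Char) (a b : Nat) (hab : a + 1 = b) (hb : b < cs.length) :
    IsPalIJ cs (a : Int) (b : Int) ↔ cs[a]'(by omega) = cs[b]'hb := by
  rw [pal_decomp cs a b (by omega) hb]
  have htrivial : IsPalIJ cs ((a : Int) + 1) ((b : Int) - 1) := by
    unfold IsPalIJ subIJ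
    have : ((b:Int) - 1 - ((a:Int)+1) + 1).toNat = 0 := by omega
    rw [this]
    rfl
  tauto

-- the condition of stepI decides palindromicity of (i, i+L-1), given the partial table
lemma condI_iff (text : String) (L k i : Int) (pal : PySem.Dict (Int × Int) Bool)
    (hspec : TabSpecP text.toList pal L k) (hL : 1 ≤ L) (h0 : 0 ≤ i)
    (hj : i + L - 1 < (text.toList.length : Int)) :
    ((PySem.Str.pyGet? text i == PySem.Str.pyGet? text (i + L - 1))
        && (decide (L < 3) || pal.getD (i + 1, i + L - 1 - 1) false)) = true ↔
      IsPalIJ text.toList i (i + L - 1) := by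
  set cs := text.toList with hcs
  obtain ⟨a, rfl⟩ : ∃ a : Nat, i = (a : Int) := ⟨i.toNat, by omega⟩
  obtain ⟨b, hb⟩ : ∃ b : Nat, (a : Int) + L - 1 = (b : Int) := ⟨((a:Int)+L-1).toNat, by omega⟩
  rw [hb]
  have hblen : b < cs.length := by omega
  have hget : ∀ (c : Nat) (hc : c < cs.length),
      PySem.Str.pyGet? text (c : Int) = some (cs[c]'hc) := by
    intro c hc
    rw [PySem.Str.pyGet?_natCast, ← hcs, List.getElem?_eq_getElem hc]
  rw [hget a (by omega), hget b hblen]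
  simp only [Bool.and_eq_true, Bool.or_eq_true, decide_eq_true_eq, beq_iff_eq, Option.some.injEq]
  rcases lt_trichotomy L 2 with h2 | h2 | h2
  · -- L = 1, a = b
    have hab : a = b := by omega
    subst hab
    have hL3 : L < 3 := by omega
    simp [pal_single cs a (by omega), hL3]
  · -- L = 2, b = a + 1
    rw [pal_pair cs a b (by omega) hblen]
    have : L < 3 := by omega
    tauto
  · -- L ≥ 3
    have hab : a < b := by omega
    rw [pal_decomp cs a b hab hblen]
    have hL3 : ¬ (L < 3) := by omega
    have hinner : pal.getD ((a:Int) + 1, (b:Int) - 1) false = true ↔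
        IsPalIJ cs ((a:Int)+1) ((b:Int)-1) := by
      rw [hspec]
      constructor
      · tauto
      · intro h
        exact ⟨by omega, by omega, by omega, h, Or.inl (by omega)⟩
    rw [hinner]
    tauto

lemma inner_fold (text : String) (L : Int) (pal : PySem.Dict (Int × Int) Bool)
    (hL : 1 ≤ L) (hspec : TabSpecP text.toList pal L 0) :
    ∀ (k : Nat), (k : Int) ≤ (text.toList.length : Int) - L + 1 →
      TabSpecP text.toList ((PySem.List.pyRange 0 (k : Int) 1).foldl (stepI text L) pal) L k := by
  intro k
  induction k with
  | zero =>
    intro _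
    rw [PySem.List.pyRange_one_eq_nil (by omega)]
    exact hspec
  | succ k ih =>
    intro hk
    have hk' : (k : Int) ≤ (text.toList.length : Int) - L + 1 := by push_cast at hk ⊢; omega
    have ihd := ih hk'
    have hsplit : PySem.List.pyRange 0 ((k:Int)+1) 1 = PySem.List.pyRange 0 (k:Int) 1 ++ [(k:Int)] :=
      PySem.List.pyRange_one_succ_right (by omega)
    rw [show ((k+1 : Nat) : Int) = (k:Int) + 1 by push_cast; omega, hsplit, List.foldl_append]
    set d := (PySem.List.pyRange 0 (k:Int) 1).foldl (stepI text L) pal with hd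
    have hjlt : (k : Int) + L - 1 < (text.toList.length : Int) := by push_cast at hk; omega
    have hcond := condI_iff text L k (k:Int) d ihd hL (by omega) hjlt
    show TabSpecP text.toList (stepI text L d (k:Int)) L ((k:Int)+1)
    unfold stepI
    simp only []
    by_cases hc : ((PySem.Str.pyGet? text (k:Int) == PySem.Str.pyGet? text ((k:Int) + L - 1))
        && (decide (L < 3) || d.getD ((k:Int) + 1, (k:Int) + L - 1 - 1) false)) = true
    · rw [if_pos hc]
      have hpal : IsPalIJ text.toList (k:Int) ((k:Int)+L-1) := hcond.mp hc
      intro i' j'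
      rw [PySem.Dict.getD_insert]
      by_cases heq : (i', j') = ((k:Int), (k:Int)+L-1)
      · rw [if_pos heq]
        obtain ⟨h1, h2⟩ := Prod.mk.injEq .. ▸ heq
        subst h1; subst h2
        simp only [true_iff]
        exact ⟨by omega, by omega, hjlt, hpal, Or.inr ⟨by omega, by omega⟩⟩
      · rw [if_neg heq, ihd i' j']
        have hne : i' ≠ (k:Int) ∨ j' ≠ (k:Int)+L-1 := by
          by_contra h
          rw [not_or, not_not, not_not] at h
          exact heq (by rw [h.1, h.2])
        constructor
        · rintro ⟨u1, u2, u3, u4, u5⟩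
          exact ⟨u1, u2, u3, u4, by omega⟩
        · rintro ⟨u1, u2, u3, u4, u5⟩
          refine ⟨u1, u2, u3, u4, ?_⟩
          rcases hne with hne | hne <;> omega
    · rw [if_neg hc]
      have hnpal : ¬ IsPalIJ text.toList (k:Int) ((k:Int)+L-1) := fun h => hc (hcond.mpr h)
      intro i' j'
      rw [ihd i' j']
      constructor
      · rintro ⟨u1, u2, u3, u4, u5⟩
        exact ⟨u1, u2, u3, u4, by omega⟩
      · rintro ⟨u1, u2, u3, u4, u5⟩
        refine ⟨u1, u2, u3, u4, ?_⟩
        rcases u5 with u5 | u5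
        · exact Or.inl u5
        · by_cases hik : i' = (k:Int)
          · exfalso
            apply hnpal
            have hj' : j' = (k:Int) + L - 1 := by omega
            rw [hik, hj'] at u4
            exact u4
          · exact Or.inr ⟨u5.1, by omega⟩

lemma outer_fold (text : String) : ∀ (L : Nat), (L : Int) ≤ (text.toList.length : Int) →
    TabSpec text.toList
      ((PySem.List.pyRange 1 ((L : Int) + 1) 1).foldl (stepL text) PySem.Dict.empty) (L : Int) := by
  intro L
  induction L with
  | zero =>
    intro _
    rw [show ((0:Nat):Int) + 1 = 1 by omega, PySem.List.pyRange_one_eq_nil (by omega)]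
    intro i j
    rw [List.foldl_nil, getD_empty_pair]
    constructor
    · intro h; cases h
    · rintro ⟨u1, u2, u3, u4, u5⟩; omega
  | succ L ih =>
    intro hL
    have hL' : (L : Int) ≤ (text.toList.length : Int) := by push_cast at hL ⊢; omega
    rw [show (((L+1:Nat)):Int) + 1 = ((L:Int) + 1) + 1 by push_cast; omega,
        PySem.List.pyRange_one_succ_right (by omega), List.foldl_append]
    set d := (PySem.List.pyRange 1 ((L:Int) + 1) 1).foldl (stepL text) PySem.Dict.empty with hd
    have ihd : TabSpec text.toList d (L:Int) := ih hL'
    have hspec0 : TabSpecP text.toList d ((L:Int)+1) 0 := by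
      intro i j
      rw [ihd i j]
      constructor
      · rintro ⟨u1, u2, u3, u4, u5⟩; exact ⟨u1, u2, u3, u4, Or.inl (by omega)⟩
      · rintro ⟨u1, u2, u3, u4, u5⟩; exact ⟨u1, u2, u3, u4, by omega⟩
    show TabSpec text.toList (stepL text d ((L:Int)+1)) ((L:Int)+1)
    unfold stepL
    have hkval : (text.toList.length : Int) - ((L:Int)+1) + 1 =
        ((text.toList.length - L : Nat) : Int) := by
      push_cast at hL ⊢; omega
    rw [PySem.Str.len_eq, hkval]
    have hres := inner_fold text ((L:Int)+1) d (by omega) hspec0 (text.toList.length - L)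
      (by push_cast at hL ⊢; omega)
    intro i j
    rw [hres i j]
    constructor
    · rintro ⟨u1, u2, u3, u4, u5⟩; exact ⟨u1, u2, u3, u4, by omega⟩
    · rintro ⟨u1, u2, u3, u4, u5⟩
      refine ⟨u1, u2, u3, u4, ?_⟩
      by_cases hlen : j - i + 1 = (L:Int) + 1
      · refine Or.inr ⟨hlen, ?_⟩
        push_cast at hkval ⊢
        omega
      · exact Or.inl (by omega)

lemma pal_table_spec (text : String) :
    TabSpec text.toList (pal_table text) (text.toList.length : Int) := by
  have h := outer_fold text text.toList.length (le_refl _)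
  rw [pal_table_eq, PySem.Str.len_eq]
  exact h

-- A's slice-and-reverse test agrees with IsPalIJ
lemma condA_iff (text : String) (i j : Int) (h0 : 0 ≤ i) (hij : i ≤ j) :
    ((some (PySem.Str.slice text (some i) (some (j + 1))) ==
        PySem.Str.slice? (PySem.Str.slice text (some i) (some (j + 1))) none none (-1)) = true) ↔
      IsPalIJ text.toList i j := by
  rw [PySem.Str.slice?_none_none_neg_one]
  have htl : (PySem.Str.slice text (some i) (some (j + 1))).toList = subIJ text.toList i j := by
    rw [PySem.Str.toList_slice, PySem.Chars.slice_eq_listSlice,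
        PySem.List.slice_toNat _ h0 (by omega)]
    unfold subIJ
    congr 1
    omega
  simp only [beq_iff_eq, Option.some.injEq]
  rw [String.ext_iff, String.toList_ofList, htl]
  unfold IsPalIJ
  exact eq_comm

-- ===== VERDICT (by name: the statement is the Claim_ definition above) =====
theorem brute_force_occurrences_spec : Claim_equal_brute_force_occurrences := by
  intro text _
  unfold Spec_brute_force_occurrences brute_force_occurrences brute_force_occurrences_alt
  simp only []
  apply congrArg PySem.Dict.items
  rw [PySem.Str.len_eq]
  apply PySem.List.foldl_congr_mem
  intro acc i hi
  apply PySem.List.foldl_congr_mem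
  intro acc2 j hj
  rw [PySem.List.mem_pyRange_one] at hi hj
  have hcond : (some (PySem.Str.slice text (some i) (some (j + 1))) ==
        PySem.Str.slice? (PySem.Str.slice text (some i) (some (j + 1))) none none (-1)) =
      (pal_table text).getD (i, j) false := by
    rw [Bool.eq_iff_iff, condA_iff text i j (by omega) (by omega),
        pal_table_spec text i j]
    constructor
    · intro h
      exact ⟨by omega, by omega, by omega, h, by omega⟩
    · rintro ⟨u1, u2, u3, u4, u5⟩
      exact u4
  rw [hcond]
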